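-- pv_equiv track=rewrite | github.com/parasiitism/AlgoDaily | leetcode/2105-watering-plants-ii/main.py | minimumRefill
-- ===== SOURCE A (Python) =====
-- from typing import List
--
-- def minimumRefill(plants: List[int], capacityA: int, capacityB: int) -> int:
--     n = len(plants)
--     res = 0
--     left, right = 0, n-1
--     canA, canB = capacityA, capacityB
--     while left < right:
--         if canA < plants[left]:
--             canA = capacityA
--             res += 1
--         if canB < plants[right]:
--             canB = capacityB
--             res += 1
--         canA -= plants[left]
--         canB -= plants[right]
--         left += 1
--         right -= 1
--     if left == right:
--         if canA >= canB:
--             if canA < plants[left]: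
--                 res += 1
--         else:
--             if canB < plants[right]:
--                 res += 1
--     return res
-- ===== SOURCE B (Python) =====
-- def _levels(cap, ps):
--     """Can contents just before each plant of ps, plus the final contents."""
--     out = [cap]
--     for p in ps:
--         c = out[-1]
--         out.append((cap if c < p else c) - p)
--     return out
--
-- def minimumRefill(plants, capacityA, capacityB):
--     n = len(plants)
--     m = n // 2
--     left = plants[:m]
--     rightRev = plants[n - m:][::-1]
--     la = _levels(capacityA, left)
--     lb = _levels(capacityB, rightRev)
--     res = sum(c < p for c, p in zip(la, left))
--     res += sum(c < p for c, p in zip(lb, rightRev))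
--     if n % 2 == 1:
--         mid = plants[m]
--         res += (la[-1] < mid) if la[-1] >= lb[-1] else (lb[-1] < mid)
--     return int(res)
-- ===== Notes on version B (the rewrite author's own statement) =====
-- stated objective: simpler
-- what changed: Replaced A's interleaved two-pointer while loop carrying five mutable variables with a scan-then-count decomposition: slice out the two halves, compute each gardener's list of can levels with a helper scan, count refills in a separate zip comprehension, and handle the odd middle plant from the final levels.
import Mathlib
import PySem

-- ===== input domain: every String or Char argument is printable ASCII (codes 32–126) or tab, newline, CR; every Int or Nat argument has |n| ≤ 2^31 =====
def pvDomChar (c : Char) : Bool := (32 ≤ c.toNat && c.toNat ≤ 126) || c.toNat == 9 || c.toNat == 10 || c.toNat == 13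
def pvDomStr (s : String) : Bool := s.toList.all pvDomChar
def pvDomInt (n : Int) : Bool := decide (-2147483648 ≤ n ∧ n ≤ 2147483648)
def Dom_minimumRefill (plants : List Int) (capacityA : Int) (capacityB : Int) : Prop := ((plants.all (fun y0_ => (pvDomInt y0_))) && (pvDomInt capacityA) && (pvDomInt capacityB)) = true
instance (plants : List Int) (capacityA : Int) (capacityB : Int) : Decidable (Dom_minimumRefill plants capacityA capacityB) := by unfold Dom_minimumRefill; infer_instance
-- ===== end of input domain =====

-- B replaces A's interleaved two-pointer simulation by a scan-then-count decomposition: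
-- it slices out the two halves, computes for each half the list of can levels before each
-- plant, counts the refills in a separate zip pass, and handles the odd middle separately;
-- objective: simpler.

-- ===== PORT A =====
-- the while loop of A: state (left, right, res, canA, canB), returned as a 5-tuple
def minimumRefillLoop (plants : List Int) (capacityA capacityB : Int)
    (left right res canA canB : Int) : Int × Int × Int × Int × Int :=
  if _h : left < right then
    let pl := PySem.List.pyGetD plants left 0
    let pr := PySem.List.pyGetD plants right 0
    let s1 : Int × Int := if canA < pl then (res + 1, capacityA) else (res, canA)
    let s2 : Int × Int := if canB < pr then (s1.1 + 1, capacityB) else (s1.1, canB)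
    minimumRefillLoop plants capacityA capacityB (left + 1) (right - 1)
      s2.1 (s1.2 - pl) (s2.2 - pr)
  else (left, right, res, canA, canB)
termination_by (right - left).toNat
decreasing_by omega

def minimumRefill (plants : List Int) (capacityA : Int) (capacityB : Int) : Int :=
  let n : Int := plants.length
  let s := minimumRefillLoop plants capacityA capacityB 0 (n - 1) 0 capacityA capacityB
  let left := s.1
  let right := s.2.1
  let res := s.2.2.1
  let canA := s.2.2.2.1
  let canB := s.2.2.2.2
  if left = right then
    if canA ≥ canB then
      if canA < PySem.List.pyGetD plants left 0 then res + 1 else res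
    else
      if canB < PySem.List.pyGetD plants right 0 then res + 1 else res
  else res

-- ===== PORT B =====
-- _levels(cap, ps): can contents just before each plant of ps, plus the final contents
def pvLevels (cap : Int) (ps : List Int) : List Int :=
  ps.foldl (fun out p =>
    let c := out.getLast!          -- out[-1]; out is always non-empty
    out ++ [(if c < p then cap else c) - p]) [cap]

def minimumRefill_alt (plants : List Int) (capacityA : Int) (capacityB : Int) : Int :=
  let n : Int := plants.length
  let m := PySem.Int.floordiv n 2
  let left := PySem.List.slice plants none (some m)                      -- plants[:m]
  let rightRev := (PySem.List.slice plants (some (n - m)) none).reverse  -- plants[n-m:][::-1] ([::-1] = reverse, PySem.List.slice?_none_none_neg_one)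
  let la := pvLevels capacityA left
  let lb := pvLevels capacityB rightRev
  let res := ((la.zip left).map (fun cp => if cp.1 < cp.2 then (1:Int) else 0)).sum
  let res2 := res + ((lb.zip rightRev).map (fun cp => if cp.1 < cp.2 then (1:Int) else 0)).sum
  if PySem.Int.mod n 2 = 1 then
    let mid := PySem.List.pyGetD plants m 0
    res2 + (if la.getLast! ≥ lb.getLast! then (if la.getLast! < mid then (1:Int) else 0)
            else (if lb.getLast! < mid then (1:Int) else 0))
  else res2

-- ===== PRECONDITION & SPEC =====
def Spec_minimumRefill (plants : List Int) (capacityA : Int) (capacityB : Int) (out : Int) : Prop := out = minimumRefill_alt plants capacityA capacityB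
instance (plants : List Int) (capacityA : Int) (capacityB : Int) (out : Int) : Decidable (Spec_minimumRefill plants capacityA capacityB out) := by unfold Spec_minimumRefill; infer_instance

-- ===== CLAIM (what is proved, stated in full; the proofs are below) =====
def Claim_equal_minimumRefill : Prop := ∀ (plants : List Int) (capacityA : Int) (capacityB : Int), Dom_minimumRefill plants capacityA capacityB → Spec_minimumRefill plants capacityA capacityB (minimumRefill plants capacityA capacityB)

-- ===== LEMMAS AND PROOFS =====

-- one step of the two simulations, on the plant VALUE (A's loop applies it through an index)
def pvStepV (cap : Int) (s : Int × Int) (p : Int) : Int × Int :=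
  let s1 := if s.2 < p then (s.1 + 1, cap) else s
  (s1.1, s1.2 - p)

def pvStep (plants : List Int) (cap : Int) (s : Int × Int) (i : Int) : Int × Int :=
  pvStepV cap s (PySem.List.pyGetD plants i 0)

-- the forward index list [l, l+1, …] consumed by the left pointer, and the backward
-- list [r, r-1, …] consumed by the right pointer, over one run of A's while loop
def pvFwd (l r : Int) : List Int :=
  if _h : l < r then l :: pvFwd (l + 1) (r - 1) else []
termination_by (r - l).toNat
decreasing_by omega

def pvBwd (l r : Int) : List Int :=
  if _h : l < r then r :: pvBwd (l + 1) (r - 1) else []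
termination_by (r - l).toNat
decreasing_by omega

-- the refill count of a fold of pvStep is additive in the starting count
lemma pvStep_shift (plants : List Int) (cap : Int) (idxs : List Int) :
    ∀ res can : Int,
      idxs.foldl (pvStep plants cap) (res, can)
        = (res + (idxs.foldl (pvStep plants cap) (0, can)).1,
           (idxs.foldl (pvStep plants cap) (0, can)).2) := by
  induction idxs with
  | nil => intro res can; simp
  | cons i t ih =>
    intro res can
    simp only [List.foldl_cons]
    by_cases h : can < PySem.List.pyGetD plants i 0
    · simp only [pvStep, pvStepV, h, ite_true]
      rw [ih (res + 1), ih (0 + 1)]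
      simp [Prod.ext_iff]
      try ring
    · simp only [pvStep, pvStepV, h, ite_false]
      rw [ih res, ih 0]

lemma loop_eq (plants : List Int) (capA capB : Int) :
    ∀ (fuel : Nat) (l r res canA canB : Int), (r - l).toNat ≤ fuel →
      minimumRefillLoop plants capA capB l r res canA canB
        = (l + (pvFwd l r).length, r - (pvFwd l r).length,
           res + ((pvFwd l r).foldl (pvStep plants capA) (0, canA)).1
               + ((pvBwd l r).foldl (pvStep plants capB) (0, canB)).1,
           ((pvFwd l r).foldl (pvStep plants capA) (0, canA)).2,
           ((pvBwd l r).foldl (pvStep plants capB) (0, canB)).2) := by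
  intro fuel
  induction fuel with
  | zero =>
    intro l r res canA canB hle
    have hlr : ¬ l < r := by omega
    rw [minimumRefillLoop, pvFwd, pvBwd]
    simp [hlr]
  | succ k ih =>
    intro l r res canA canB hle
    by_cases hlr : l < r
    · rw [minimumRefillLoop, pvFwd, pvBwd]
      simp only [hlr, dif_pos, List.foldl_cons, List.length_cons]
      rw [ih (l + 1) (r - 1) _ _ _ (by omega)]
      by_cases hA : canA < PySem.List.pyGetD plants l 0 <;>
        by_cases hB : canB < PySem.List.pyGetD plants r 0 <;>
        simp only [pvStep, pvStepV, hA, hB, ite_true, ite_false, zero_add]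
      · rw [pvStep_shift plants capA _ 1, pvStep_shift plants capB _ 1]
        simp [Prod.ext_iff]
        refine ⟨by ring, by ring, by ring⟩
      · rw [pvStep_shift plants capA _ 1]
        simp [Prod.ext_iff]
        refine ⟨by ring, by ring, by ring⟩
      · rw [pvStep_shift plants capB _ 1]
        simp [Prod.ext_iff]
        refine ⟨by ring, by ring, by ring⟩
      · simp [Prod.ext_iff]
        refine ⟨by ring, by ring⟩
    · rw [minimumRefillLoop, pvFwd, pvBwd]
      simp [hlr]

lemma pvFwd_eq (fuel : Nat) : ∀ l r : Int, (r - l).toNat ≤ fuel →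
    pvFwd l r = PySem.List.pyRange l (l + (r - l + 1) / 2) 1 := by
  induction fuel with
  | zero =>
    intro l r hle
    rw [pvFwd]
    simp only [show ¬ l < r by omega, dif_neg, not_false_iff]
    rw [PySem.List.pyRange_one_eq_nil (by omega)]
  | succ k ih =>
    intro l r hle
    by_cases hlr : l < r
    · rw [pvFwd]
      simp only [hlr, dif_pos]
      rw [PySem.List.pyRange_one_cons (show l < l + (r - l + 1) / 2 by omega)]
      congr 1
      rw [ih (l + 1) (r - 1) (by omega)]
      congr 1
      omega
    · rw [pvFwd]
      simp only [hlr, dif_neg, not_false_iff]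
      rw [PySem.List.pyRange_one_eq_nil (by omega)]

lemma pvBwd_eq (fuel : Nat) : ∀ l r : Int, (r - l).toNat ≤ fuel →
    pvBwd l r = (PySem.List.pyRange 0 ((r - l + 1) / 2) 1).map (fun i => r - i) := by
  induction fuel with
  | zero =>
    intro l r hle
    rw [pvBwd]
    simp only [show ¬ l < r by omega, dif_neg, not_false_iff]
    rw [PySem.List.pyRange_one_eq_nil (by omega)]
    simp
  | succ k ih =>
    intro l r hle
    by_cases hlr : l < r
    · rw [pvBwd]
      simp only [hlr, dif_pos]
      rw [PySem.List.pyRange_one_cons (show (0:Int) < (r - l + 1) / 2 by omega),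
          List.map_cons, sub_zero]
      congr 1
      rw [ih (l + 1) (r - 1) (by omega)]
      rw [PySem.List.pyRange_one, PySem.List.pyRange_one]
      simp only [List.map_map]
      rw [show ((r - 1 - (l + 1) + 1) / 2 - 0).toNat = ((r - l + 1) / 2 - (0 + 1)).toNat by omega]
      apply List.map_congr_left
      intro a _
      simp only [Function.comp_apply]
      omega
    · rw [pvBwd]
      simp only [hlr, dif_neg, not_false_iff]
      rw [PySem.List.pyRange_one_eq_nil (by omega)]
      simp

lemma pvFwd_zero (plants : List Int) :
    pvFwd 0 ((plants.length : Int) - 1)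
      = PySem.List.pyRange 0 (PySem.Int.floordiv (plants.length : Int) 2) 1 := by
  have hn : (0:Int) ≤ (plants.length : Int) := Int.natCast_nonneg _
  rw [pvFwd_eq ((plants.length : Int) - 1 - 0).toNat 0 _ le_rfl,
      PySem.Int.floordiv_eq_ediv_of_pos (by omega)]
  congr 1
  omega

lemma pvBwd_zero (plants : List Int) :
    pvBwd 0 ((plants.length : Int) - 1)
      = (PySem.List.pyRange 0 (PySem.Int.floordiv (plants.length : Int) 2) 1).map
          (fun i => (plants.length : Int) - 1 - i) := by
  have hn : (0:Int) ≤ (plants.length : Int) := Int.natCast_nonneg _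
  rw [pvBwd_eq ((plants.length : Int) - 1 - 0).toNat 0 _ le_rfl,
      PySem.Int.floordiv_eq_ediv_of_pos (by omega)]
  congr 2
  omega

-- the tail of the level list produced by _levels after a first entry c
def pvTl (cap : Int) : Int → List Int → List Int
  | _, [] => []
  | c, p :: t => ((if c < p then cap else c) - p) :: pvTl cap ((if c < p then cap else c) - p) t

lemma getLast!_concat (pre : List Int) (c : Int) : (pre ++ [c]).getLast! = c := by simp

lemma pvLevels_from (cap : Int) (ps : List Int) :
    ∀ (pre : List Int) (c : Int),
      ps.foldl (fun out p =>
          out ++ [(if out.getLast! < p then cap else out.getLast!) - p]) (pre ++ [c])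
        = (pre ++ [c]) ++ pvTl cap c ps := by
  induction ps with
  | nil => intro pre c; simp [pvTl]
  | cons p t ih =>
    intro pre c
    simp only [List.foldl_cons, getLast!_concat, pvTl]
    rw [show (pre ++ [c]) ++ [(if c < p then cap else c) - p]
          = (pre ++ [c]) ++ [(if c < p then cap else c) - p] ++ [] ++ [] from by simp]
    rw [show ((pre ++ [c]) ++ [(if c < p then cap else c) - p] ++ [] ++ [])
          = ((pre ++ [c]) ++ [(if c < p then cap else c) - p]) from by simp]
    rw [ih (pre ++ [c]) ((if c < p then cap else c) - p)]
    simp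

lemma pvLevels_cons (cap : Int) (ps : List Int) :
    pvLevels cap ps = cap :: pvTl cap cap ps := by
  have h := pvLevels_from cap ps [] cap
  simpa [pvLevels] using h

lemma getLast!_cons_cons (c c' : Int) (l : List Int) :
    (c :: c' :: l).getLast! = (c' :: l).getLast! := rfl

-- the fold of the value-level step equals (offset + zip-count of the levels, last level)
lemma fold_levels (cap : Int) (ps : List Int) :
    ∀ (c res : Int),
      ps.foldl (pvStepV cap) (res, c)
        = (res + (((c :: pvTl cap c ps).zip ps).map
              (fun cp => if cp.1 < cp.2 then (1:Int) else 0)).sum,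
           (c :: pvTl cap c ps).getLast!) := by
  induction ps with
  | nil => intro c res; simp [pvTl, List.getLast!]
  | cons p t ih =>
    intro c res
    by_cases h : c < p
    · simp only [List.foldl_cons, pvStepV, pvTl, h, ite_true, List.zip_cons_cons,
        List.map_cons, List.sum_cons, getLast!_cons_cons]
      rw [ih (cap - p) (res + 1), Prod.ext_iff]
      exact ⟨by ring, rfl⟩
    · simp only [List.foldl_cons, pvStepV, pvTl, h, ite_false, List.zip_cons_cons,
        List.map_cons, List.sum_cons, getLast!_cons_cons]
      rw [ih (c - p) res, Prod.ext_iff]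
      exact ⟨by ring, rfl⟩

-- fold over indices = fold of the value step over the looked-up values
lemma fold_idx_eq_fold_val (plants : List Int) (cap : Int) (idxs : List Int) (init : Int × Int) :
    idxs.foldl (pvStep plants cap) init
      = (idxs.map (fun i => PySem.List.pyGetD plants i 0)).foldl (pvStepV cap) init := by
  rw [List.foldl_map]
  rfl

-- looked-up values of range(0, k) are the first k plants
lemma map_pyGetD_range_take (plants : List Int) :
    ∀ (k : Nat), k ≤ plants.length →
      (PySem.List.pyRange 0 (k : Int) 1).map (fun i => PySem.List.pyGetD plants i 0)
        = plants.take k := by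
  intro k
  induction k with
  | zero => intro _; simp [PySem.List.pyRange_one_eq_nil]
  | succ j ih =>
    intro hle
    rw [show ((j + 1 : Nat) : Int) = (j : Int) + 1 from by push_cast; ring,
        PySem.List.pyRange_one_succ_right (by positivity), List.map_append, ih (by omega),
        List.take_succ_eq_append_getElem (by omega)]
    simp only [List.map_cons, List.map_nil]
    congr 1
    rw [PySem.List.pyGetD_natCast]
    simp [List.getD, List.getElem?_eq_getElem (show j < plants.length by omega)]

lemma pyGetD_rev (plants : List Int) (i : Int) (h0 : 0 ≤ i) (h1 : i < (plants.length : Int)) :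
    PySem.List.pyGetD plants ((plants.length : Int) - 1 - i) 0
      = PySem.List.pyGetD plants.reverse i 0 := by
  obtain ⟨k, rfl⟩ : ∃ k : Nat, i = (k : Int) := ⟨i.toNat, by omega⟩
  have hk : k < plants.length := by exact_mod_cast h1
  rw [show (plants.length : Int) - 1 - (k : Int) = ((plants.length - 1 - k : Nat) : Int) by omega,
      PySem.List.pyGetD_natCast, PySem.List.pyGetD_natCast]
  have h2 : plants.length - 1 - k < plants.length := by omega
  simp [List.getD, List.getElem?_eq_getElem h2,
    List.getElem?_eq_getElem (show k < plants.reverse.length by simpa using hk),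
    List.getElem_reverse]

theorem minimumRefill_eq_alt (plants : List Int) (capacityA capacityB : Int) :
    minimumRefill plants capacityA capacityB = minimumRefill_alt plants capacityA capacityB := by
  simp only [minimumRefill, minimumRefill_alt]
  have hn : (0:Int) ≤ (plants.length : Int) := Int.natCast_nonneg _
  rw [loop_eq plants capacityA capacityB ((plants.length : Int) - 1 - 0).toNat
        0 ((plants.length : Int) - 1) 0 capacityA capacityB le_rfl,
      pvFwd_zero plants, pvBwd_zero plants]
  dsimp only
  set n : Int := (plants.length : Int) with hndef
  set M : Int := PySem.Int.floordiv n 2 with hMdef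
  have hM : M = n / 2 := by rw [hMdef, PySem.Int.floordiv_eq_ediv_of_pos (by omega)]
  have hMle : M.toNat ≤ plants.length := by omega
  have hlen : ((PySem.List.pyRange 0 M 1).length : Int) = M := by
    rw [PySem.List.length_pyRange_one]; omega
  -- the two value lists are B's slices
  have hleft : (PySem.List.pyRange 0 M 1).map (fun i => PySem.List.pyGetD plants i 0)
      = PySem.List.slice plants none (some M) := by
    rw [PySem.List.slice_to plants (by omega),
        show M = (M.toNat : Int) by omega]
    exact map_pyGetD_range_take plants M.toNat hMle
  have hright : ((PySem.List.pyRange 0 M 1).map (fun i => n - 1 - i)).map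
        (fun i => PySem.List.pyGetD plants i 0)
      = (PySem.List.slice plants (some (n - M)) none).reverse := by
    rw [List.map_map]
    have hcong : ((PySem.List.pyRange 0 M 1).map
          ((fun i => PySem.List.pyGetD plants i 0) ∘ (fun i => n - 1 - i)))
        = (PySem.List.pyRange 0 M 1).map (fun i => PySem.List.pyGetD plants.reverse i 0) := by
      apply List.map_congr_left
      intro i hi
      rw [PySem.List.mem_pyRange_one] at hi
      simp only [Function.comp_apply]
      exact pyGetD_rev plants i hi.1 (by omega)
    rw [hcong, show M = (M.toNat : Int) by omega,
        map_pyGetD_range_take plants.reverse M.toNat (by simpa using hMle),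
        PySem.List.slice_from plants (by omega), List.take_reverse]
    congr 2
    show plants.length - M.toNat = (n - (M.toNat : Int)).toNat
    omega
  -- turn the index folds into level-list counts
  have hfoldA := fold_idx_eq_fold_val plants capacityA (PySem.List.pyRange 0 M 1)
      (0, capacityA)
  have hfoldB := fold_idx_eq_fold_val plants capacityB
      ((PySem.List.pyRange 0 M 1).map (fun i => n - 1 - i)) (0, capacityB)
  rw [hleft] at hfoldA
  rw [hright] at hfoldB
  rw [hfoldA, hfoldB, fold_levels, fold_levels, hlen,
      pvLevels_cons capacityA, pvLevels_cons capacityB]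
  have hmod : PySem.Int.mod n 2 = n % 2 := PySem.Int.mod_eq_emod_of_pos (by omega)
  by_cases hodd : n % 2 = 1
  · have heq : (0:Int) + M = n - 1 - M := by omega
    have hmid : n - 1 - M = M := by omega
    rw [if_pos heq, if_pos (show PySem.Int.mod n 2 = 1 by rw [hmod]; exact hodd), hmid]
    dsimp only
    simp only [zero_add, show (0:Int) + M = M from by ring]
    by_cases hge : (capacityA :: pvTl capacityA capacityA (PySem.List.slice plants none (some M))).getLast!
        ≥ (capacityB :: pvTl capacityB capacityB ((PySem.List.slice plants (some (n - M)) none).reverse)).getLast!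
    · rw [if_pos hge, if_pos hge]
      split_ifs <;> ring
    · rw [if_neg hge, if_neg hge]
      split_ifs <;> ring
  · have hne : ¬ ((0:Int) + M = n - 1 - M) := by omega
    rw [if_neg hne, if_neg (show ¬ PySem.Int.mod n 2 = 1 by rw [hmod]; exact hodd)]
    ring

-- ===== VERDICT (by name: the statement is the Claim_ definition above) =====
theorem minimumRefill_spec : Claim_equal_minimumRefill := by
  intro plants capacityA capacityB _
  unfold Spec_minimumRefill
  exact minimumRefill_eq_alt plants capacityA capacityB
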